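-- pv_equiv track=rewrite | github.com/quixotique/ABO | lib/abo/text.py | line_blocks
-- ===== SOURCE A (Python) =====
-- def line_blocks(lines):
--     r"""Return an iterator over blocks of lines, where a block is a contiguous
--     sequence of non-empty lines delimited by start file or end file or one or
--     more blank lines.
--     >>> list(line_blocks(['a', 'b', '', 'c', 'd']))
--     [['a', 'b'], ['c', 'd']]
--     """
--     block = []
--     for line in lines:
--         line = line.rstrip('\n')
--         if line:
--             if not line.startswith('#'):
--                 block.append(line)
--         elif block:
--             yield block
--             block = []
--     if block:
--         yield block
-- ===== SOURCE B (Python) =====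
-- def line_blocks(lines):
--     # Different decomposition: precompute rstripped lines once, then find maximal
--     # runs of non-blank lines with an index/two-pointer scan; filter comments per run.
--     stripped = [l.rstrip('\n') for l in lines]
--     n = len(stripped)
--     i = 0
--     while i < n:
--         if not stripped[i]:
--             i += 1
--             continue
--         j = i
--         while j < n and stripped[j]:
--             j += 1
--         block = [s for s in stripped[i:j] if not s.startswith('#')]
--         if block:
--             yield block
--         i = j
-- ===== Notes on version B (the rewrite author's own statement) =====
-- stated objective: alternative
-- what changed: Replaces the flush-on-blank accumulator generator with a run-partitioning scan: rstrip all lines once, locate each maximal run of non-blank lines with a two-pointer index loop, then filter comments out of the whole run and yield it if non-empty.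
import Mathlib
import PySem

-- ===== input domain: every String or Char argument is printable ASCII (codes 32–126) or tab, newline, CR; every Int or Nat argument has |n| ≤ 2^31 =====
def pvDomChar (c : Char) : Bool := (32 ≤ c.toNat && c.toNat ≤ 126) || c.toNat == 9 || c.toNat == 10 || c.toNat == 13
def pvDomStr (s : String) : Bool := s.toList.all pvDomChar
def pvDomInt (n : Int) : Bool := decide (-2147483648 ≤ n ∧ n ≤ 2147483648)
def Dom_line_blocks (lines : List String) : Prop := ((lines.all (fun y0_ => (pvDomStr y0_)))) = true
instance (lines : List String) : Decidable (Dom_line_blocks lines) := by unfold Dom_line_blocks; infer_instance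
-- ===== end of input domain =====

-- B rebuilds the same blocks by a run-partitioning scan instead of A's flush-on-blank
-- accumulator; same O(n) cost, different decomposition.

-- exact port of str.rstrip('\n'): drop all trailing '\n' characters
def rstripNl (s : String) : String :=
  String.ofList ((s.toList.reverse.dropWhile (fun c => c == '\n')).reverse)

-- truthiness of a str: non-empty
def pyNonblank (s : String) : Bool := s != ""
-- 'not line.startswith('#')'
def pyKeep (s : String) : Bool := !(PySem.Str.startswith s "#")

-- ===== PORT A =====
def stepA (st : List (List String) × List String) (line : String) :
    List (List String) × List String :=
  let line := rstripNl line
  if pyNonblank line then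
    if pyKeep line then (st.1, st.2 ++ [line]) else st
  else if st.2 ≠ [] then (st.1 ++ [st.2], []) else st

def line_blocks (lines : List String) : List (List String) :=
  let st := lines.foldl stepA ([], [])
  if st.2 ≠ [] then st.1 ++ [st.2] else st.1

-- ===== PORT B =====
-- comment filtering of one run
def filtRun (run : List String) : List String := run.filter pyKeep

-- the index/two-pointer scan of Source B: skip blanks, take a maximal non-blank run
def altGo : List String → List (List String)
  | [] => []
  | l :: rest =>
    if pyNonblank l then
      (if filtRun (l :: rest.takeWhile pyNonblank) ≠ []
        then [filtRun (l :: rest.takeWhile pyNonblank)] else []) ++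
      altGo (rest.dropWhile pyNonblank)
    else altGo rest
  termination_by xs => xs.length
  decreasing_by
    · exact Nat.lt_succ_of_le (List.length_dropWhile_le _ _)
    · simp

def line_blocks_alt (lines : List String) : List (List String) :=
  altGo (lines.map rstripNl)

-- ===== PRECONDITION & SPEC =====
def Spec_line_blocks (lines : List String) (out : List (List String)) : Prop := out = line_blocks_alt lines
instance (lines : List String) (out : List (List String)) : Decidable (Spec_line_blocks lines out) := by unfold Spec_line_blocks; infer_instance

-- ===== CLAIM (what is proved, stated in full; the proofs are below) =====
def Claim_equal_line_blocks : Prop := ∀ (lines : List String), Dom_line_blocks lines → Spec_line_blocks lines (line_blocks lines)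

-- ===== LEMMAS AND PROOFS =====

-- A's remaining output as a recursion over the (already rstripped) lines, with pending block
def goA : List String → List String → List (List String)
  | block, [] => if block ≠ [] then [block] else []
  | block, x :: xs =>
    if pyNonblank x then
      goA (if pyKeep x then block ++ [x] else block) xs
    else (if block ≠ [] then [block] else []) ++ goA [] xs

theorem foldA_eq_goA (lines : List String) (out : List (List String)) (block : List String) :
    (let st := lines.foldl stepA (out, block)
     if st.2 ≠ [] then st.1 ++ [st.2] else st.1) = out ++ goA block (lines.map rstripNl) := by
  induction lines generalizing out block with
  | nil => by_cases h : block = [] <;> simp [goA, h]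
  | cons l ls ih =>
    simp only [List.foldl_cons, List.map_cons]
    by_cases hb : pyNonblank (rstripNl l)
    · by_cases hc : pyKeep (rstripNl l)
      · simpa [stepA, goA, hb, hc] using ih out (block ++ [rstripNl l])
      · simpa [stepA, goA, hb, hc] using ih out block
    · by_cases hblk : block = []
      · simpa [stepA, goA, hb, hblk] using ih out block
      · have := ih (out ++ [block]) []
        simp only [stepA, hb, Bool.false_eq_true, if_false, hblk, ne_eq, not_false_eq_true,
          if_true] at this ⊢
        simp [goA, hb, hblk, this, List.append_assoc]

-- altGo unfolds as one run step on any list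
theorem altGo_unfold (t : List String) :
    altGo t = (if filtRun (t.takeWhile pyNonblank) ≠ []
                 then [filtRun (t.takeWhile pyNonblank)] else []) ++
              altGo (t.dropWhile pyNonblank) := by
  match t with
  | [] => simp [altGo, filtRun]
  | l :: rest =>
    by_cases h : pyNonblank l
    · simp [altGo, h]
    · simp [altGo, h, List.takeWhile_cons, filtRun]

-- master invariant: goA with pending block over xs = finish the current run, then scan the rest
theorem goA_eq_altGo (xs : List String) (block : List String) :
    goA block xs =
      (if block ++ filtRun (xs.takeWhile pyNonblank) ≠ []
        then [block ++ filtRun (xs.takeWhile pyNonblank)] else []) ++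
      altGo (xs.dropWhile pyNonblank) := by
  induction xs generalizing block with
  | nil =>
    by_cases h : block = [] <;> simp [goA, altGo, filtRun, h]
  | cons x t ih =>
    by_cases hx : pyNonblank x
    · rw [show goA block (x :: t) = goA (if pyKeep x then block ++ [x] else block) t by
        simp [goA, hx]]
      rw [ih]
      by_cases hc : pyKeep x
      · simp [hx, hc, filtRun, List.takeWhile_cons, List.append_assoc]
      · simp [hx, hc, filtRun, List.takeWhile_cons]
    · rw [show goA block (x :: t) = (if block ≠ [] then [block] else []) ++ goA [] t by
        simp [goA, hx]]
      rw [ih []]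
      simp only [List.nil_append]
      rw [← altGo_unfold t]
      simp [altGo, hx, filtRun]

-- ===== VERDICT (by name: the statement is the Claim_ definition above) =====
theorem line_blocks_spec : Claim_equal_line_blocks := by
  intro lines _
  show line_blocks lines = line_blocks_alt lines
  unfold line_blocks line_blocks_alt
  rw [foldA_eq_goA lines [] [], goA_eq_altGo]
  simp only [List.nil_append, ← altGo_unfold]
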